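-- pv_equiv track=rewrite | github.com/jasontan656/Otctopus_OS_AgentConsole | Skills/Meta-Runtime-Selfcheck/scripts/runtime_selfcheck_command_governance.py | _extract_repeated_flag_values
-- ===== SOURCE A (Python) =====
-- def _extract_repeated_flag_values(tokens: list[str], flag: str) -> list[str]:
--     values: list[str] = []
--     idx = 0
--     while idx < len(tokens):
--         token = str(tokens[idx] or "").strip()
--         if token == flag:
--             if idx + 1 < len(tokens):
--                 values.append(str(tokens[idx + 1] or "").strip())
--             idx += 2
--             continue
--         if token.startswith(f"{flag}="):
--             values.append(token.partition("=")[2].strip())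
--         idx += 1
--     return values
-- ===== SOURCE B (Python) =====
-- def _extract_repeated_flag_values(tokens: list[str], flag: str) -> list[str]:
--     values: list[str] = []
--     expecting_value = False
--     prefix = f"{flag}="
--     for tok in tokens:
--         token = str(tok or "").strip()
--         if expecting_value:
--             values.append(token)
--             expecting_value = False
--         elif token == flag:
--             expecting_value = True
--         elif token.startswith(prefix):
--             values.append(token.partition("=")[2].strip())
--     return values
-- ===== Notes on version B (the rewrite author's own statement) =====
-- stated objective: idiomatic
-- what changed: Replaced the index-driven while loop with manual idx += 2 skipping by a single for-loop carrying a boolean expecting_value state that consumes the value token after a bare flag; the f'{flag}=' prefix is built once instead of once per token.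
import Mathlib
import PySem

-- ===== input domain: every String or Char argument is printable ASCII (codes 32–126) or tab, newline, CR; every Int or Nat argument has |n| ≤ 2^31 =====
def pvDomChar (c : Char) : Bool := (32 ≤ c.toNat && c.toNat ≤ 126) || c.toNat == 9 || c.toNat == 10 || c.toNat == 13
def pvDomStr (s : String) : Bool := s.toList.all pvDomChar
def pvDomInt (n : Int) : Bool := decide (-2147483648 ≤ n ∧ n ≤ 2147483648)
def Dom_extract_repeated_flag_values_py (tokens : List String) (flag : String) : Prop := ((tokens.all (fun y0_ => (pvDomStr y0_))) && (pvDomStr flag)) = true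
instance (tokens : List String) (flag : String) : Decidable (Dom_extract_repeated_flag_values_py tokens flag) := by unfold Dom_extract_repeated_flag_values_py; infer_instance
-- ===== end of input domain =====

-- B rewrites A's index-driven while loop (idx += 2 skip) as a single pass with a
-- boolean `expecting_value` state; same return value, simpler decomposition.

-- shared primitive: exact hand-port of Python's `s.partition("=")[2]`
-- (suffix after the FIRST '='; "" when '=' is absent) — both Pythons call it
def pvEqPartAfter : List Char → List Char
  | [] => []
  | c :: r => if c = '=' then r else pvEqPartAfter r

-- ===== PORT A =====
-- A's while loop over idx, transcribed as structural recursion on the suffix of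
-- tokens (idx advances by 2 exactly when the stripped token equals the flag)
def pvLoopA (flag : String) : List String → List String
  | [] => []
  | t :: rest =>
    let token := PySem.Str.strip t
    if token = flag then
      match rest with
      | [] => []
      | v :: rest' => PySem.Str.strip v :: pvLoopA flag rest'
    else if PySem.Str.startswith token (flag ++ "=") then
      PySem.Str.strip (String.ofList (pvEqPartAfter token.toList)) :: pvLoopA flag rest
    else pvLoopA flag rest

def extract_repeated_flag_values_py (tokens : List String) (flag : String) : List String :=
  pvLoopA flag tokens

-- ===== PORT B =====
-- one step of B's for loop: state = (expecting_value, values)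
def pvStepB (flag : String) (st : Bool × List String) (tok : String) : Bool × List String :=
  let token := PySem.Str.strip tok
  if st.1 then (false, st.2 ++ [token])
  else if token = flag then (true, st.2)
  else if PySem.Str.startswith token (flag ++ "=") then
    (false, st.2 ++ [PySem.Str.strip (String.ofList (pvEqPartAfter token.toList))])
  else st

def extract_repeated_flag_values_py_alt (tokens : List String) (flag : String) : List String :=
  (tokens.foldl (pvStepB flag) (false, [])).2

-- ===== PRECONDITION & SPEC =====
def Spec_extract_repeated_flag_values_py (tokens : List String) (flag : String) (out : List String) : Prop := out = extract_repeated_flag_values_py_alt tokens flag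
instance (tokens : List String) (flag : String) (out : List String) : Decidable (Spec_extract_repeated_flag_values_py tokens flag out) := by unfold Spec_extract_repeated_flag_values_py; infer_instance

-- ===== CLAIM (what is proved, stated in full; the proofs are below) =====
def Claim_equal_extract_repeated_flag_values_py : Prop := ∀ (tokens : List String) (flag : String), Dom_extract_repeated_flag_values_py tokens flag → Spec_extract_repeated_flag_values_py tokens flag (extract_repeated_flag_values_py tokens flag)

-- ===== LEMMAS AND PROOFS =====
-- loop invariant: B's fold started in state (false, acc) appends exactly A's result
theorem pvFold_eq (flag : String) : ∀ (l : List String) (acc : List String),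
    (l.foldl (pvStepB flag) (false, acc)).2 = acc ++ pvLoopA flag l
  | [], acc => by simp [pvLoopA]
  | t :: rest, acc => by
    by_cases hflag : PySem.Str.strip t = flag
    · match rest with
      | [] => simp [pvLoopA, pvStepB, hflag]
      | v :: rest' =>
        have ih := pvFold_eq flag rest' (acc ++ [PySem.Str.strip v])
        simp [pvLoopA, pvStepB, hflag] at ih ⊢
        simp [ih]
    · by_cases hpre : PySem.Chars.startswith (PySem.Chars.strip t.toList) (flag.toList ++ ['=']) = true
      · have ih := pvFold_eq flag rest
          (acc ++ [PySem.Str.strip (String.ofList (pvEqPartAfter (PySem.Str.strip t).toList))])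
        simp [pvStepB, hflag, hpre] at ih ⊢
        rw [ih]
        conv_rhs => rw [pvLoopA.eq_def]
        simp [hflag, hpre]
      · have ih := pvFold_eq flag rest acc
        simp [pvStepB, hflag, hpre]
        rw [ih]
        conv_rhs => rw [pvLoopA.eq_def]
        simp [hflag, hpre]
termination_by l => l.length

-- ===== VERDICT (by name: the statement is the Claim_ definition above) =====
theorem extract_repeated_flag_values_py_spec : Claim_equal_extract_repeated_flag_values_py := by
  intro tokens flag _
  unfold Spec_extract_repeated_flag_values_py extract_repeated_flag_values_py extract_repeated_flag_values_py_alt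
  simpa using (pvFold_eq flag tokens []).symm
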